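-- pv_equiv track=rewrite | github.com/Handonggon/coding_test | programmers/2level/잉규식 알고리즘/더 맵게.py | solution
-- ===== SOURCE A (Python) =====
-- class MinHeap:
--     def __init__(self):
--         self.heap_list = [None]
--
--     def insert(self, value):
--         list_1 =  self.heap_list
--         idx = len(list_1)
--         list_1.append(value)
--         while True:
--             if idx > 1 and list_1[idx] < list_1[idx // 2]:
--                 list_1[idx], list_1[idx // 2] = list_1[idx // 2], list_1[idx]
--                 idx = idx // 2
--                 continue
--             break
--
--     def delete(self):
--         list_1 = self.heap_list
--         list_1[1] ,list_1[-1] = list_1[-1] ,list_1[1]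
--         min = list_1.pop()
--         idx = len(list_1) - 1
--         parent = 1
--         while True:
--             sibling_left = parent * 2
--             sibling_right = (parent * 2) + 1
--             get_idx = parent
--             if sibling_left <= idx and list_1[get_idx] > list_1[sibling_left]:
--                 get_idx = sibling_left
--             if sibling_right <= idx and list_1[get_idx] > list_1[sibling_right]:
--                 get_idx = sibling_right
--
--             if get_idx == parent:
--                 break
--
--             list_1[get_idx], list_1[parent] = list_1[parent], list_1[get_idx]
--             parent = get_idx
--         return min
--
-- def solution(scoville, K):
--     heap = MinHeap()
--     for i in scoville :
--         heap.insert(i)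
--     result = 0
--     while heap.heap_list[1] < K :
--         if len(heap.heap_list) == 2 :
--             return -1
--         result += 1
--         temp = heap.delete() + (heap.delete()*2)
--         heap.insert(temp)
--
--     return result
-- ===== SOURCE B (Python) =====
-- def solution(scoville, K):
--     # Maintain a sorted list instead of a hand-rolled binary heap.
--     lst = sorted(scoville)
--     count = 0
--     while lst[0] < K:
--         if len(lst) == 1:
--             return -1
--         a = lst.pop(0)
--         b = lst.pop(0)
--         x = a + b * 2
--         i = 0
--         while i < len(lst) and lst[i] <= x:
--             i += 1
--         lst.insert(i, x)
--         count += 1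
--     return count
-- ===== Notes on version B (the rewrite author's own statement) =====
-- stated objective: alternative
-- what changed: Replaces the hand-written 1-indexed binary min-heap (sift-up insert, sift-down delete) by a sorted list: sort once, pop the two smallest from the front and re-insert the mix at its sorted position.
import Mathlib
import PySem

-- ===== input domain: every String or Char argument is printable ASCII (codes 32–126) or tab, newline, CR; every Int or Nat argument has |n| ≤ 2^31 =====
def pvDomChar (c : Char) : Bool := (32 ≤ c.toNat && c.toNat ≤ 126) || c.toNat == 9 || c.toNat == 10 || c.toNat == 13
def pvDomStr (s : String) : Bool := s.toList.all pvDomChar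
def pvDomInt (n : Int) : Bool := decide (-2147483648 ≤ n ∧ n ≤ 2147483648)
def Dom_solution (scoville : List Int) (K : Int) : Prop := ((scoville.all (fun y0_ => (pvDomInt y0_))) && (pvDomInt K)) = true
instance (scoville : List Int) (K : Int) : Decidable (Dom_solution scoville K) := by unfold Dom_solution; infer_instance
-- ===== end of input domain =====

-- B replaces A's hand-written 1-indexed binary min-heap by a sorted list (sort once,
-- pop the two smallest from the front, re-insert the mix at its sorted position):
-- an alternative data structure of similar size, not claimed faster.


-- ===== PORT A =====
-- A's heap_list is 1-indexed with a dummy first cell ([None] in Python); the dummy is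
-- ported as 0 : Int — it is never read by any in-range access of A's algorithm.
-- Out-of-range reads (which raise IndexError in Python, only reachable when scoville = [])
-- are ported as getD with default 0 and excluded by Pre_solution.
def pvGet (l : List Int) (i : Nat) : Int := l.getD i 0

-- Python's simultaneous swap `l[i], l[j] = l[j], l[i]` (both reads before both writes)
def pvSwap (l : List Int) (i j : Nat) : List Int := (l.set i (pvGet l j)).set j (pvGet l i)

-- the `while True` sift-up loop of MinHeap.insert
def siftUp (l : List Int) (idx : Nat) : List Int :=
  if h : 1 < idx ∧ pvGet l idx < pvGet l (idx / 2) then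
    siftUp (pvSwap l idx (idx / 2)) (idx / 2)
  else l
termination_by idx
decreasing_by omega

def heapInsert (l : List Int) (v : Int) : List Int := siftUp (l ++ [v]) l.length

-- the two successive `if` statements of MinHeap.delete choosing get_idx
def pickChild (l : List Int) (p idx : Nat) : Nat :=
  if p * 2 ≤ idx ∧ pvGet l p > pvGet l (p * 2) then
    (if p * 2 + 1 ≤ idx ∧ pvGet l (p * 2) > pvGet l (p * 2 + 1) then p * 2 + 1 else p * 2)
  else
    (if p * 2 + 1 ≤ idx ∧ pvGet l p > pvGet l (p * 2 + 1) then p * 2 + 1 else p)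

-- needed by siftDown's termination_by; stated before the definition
theorem pickChild_ne (l : List Int) (p idx : Nat) (h : pickChild l p idx ≠ p) :
    p < pickChild l p idx ∧ pickChild l p idx ≤ idx := by
  unfold pickChild at h ⊢; split_ifs at h ⊢ <;> omega

-- the `while True` sift-down loop of MinHeap.delete
def siftDown (l : List Int) (parent idx : Nat) : List Int :=
  if h : pickChild l parent idx = parent then l
  else siftDown (pvSwap l (pickChild l parent idx) parent) (pickChild l parent idx) idx
termination_by idx + 1 - parent
decreasing_by have := pickChild_ne l parent idx h; omega

-- MinHeap.delete: swap root with last (l[-1] = index len-1), pop, sift down; returns (min, new list)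
def heapDelete (l : List Int) : Int × List Int :=
  let l1 := pvSwap l 1 (l.length - 1)
  let m := pvGet l1 (l1.length - 1)
  let l2 := l1.dropLast
  (m, siftDown l2 1 (l2.length - 1))

-- the `while heap.heap_list[1] < K` loop of solution; fuel n+1 exceeds the ≤ n-1 iterations possible
def solLoop (l : List Int) (K : Int) (result : Int) : Nat → Int
  | 0 => result
  | fuel + 1 =>
    if pvGet l 1 < K then
      if l.length = 2 then -1
      else
        let d1 := heapDelete l
        let d2 := heapDelete d1.2
        solLoop (heapInsert d2.2 (d1.1 + d2.1 * 2)) K (result + 1) fuel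
    else result

def solution (scoville : List Int) (K : Int) : Int :=
  solLoop (scoville.foldl (fun h i => heapInsert h i) [0]) K 0 (scoville.length + 1)

-- ===== PORT B =====
-- Source B's inner `while i < len(lst) and lst[i] <= x` scan + lst.insert(i, x)
def insSorted (x : Int) : List Int → List Int
  | [] => [x]
  | h :: t => if h ≤ x then h :: insSorted x t else x :: h :: t

-- Source B's `while lst[0] < K` loop (the [] case is unreachable under Pre_: Python raises there)
def altLoop (l : List Int) (K : Int) (count : Int) : Nat → Int
  | 0 => count
  | fuel + 1 =>
    match l with
    | [] => count
    | a :: t =>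
      if a < K then
        match t with
        | [] => -1
        | b :: rest => altLoop (insSorted (a + b * 2) rest) K (count + 1) fuel
      else count

def solution_alt (scoville : List Int) (K : Int) : Int :=
  altLoop (PySem.List.sorted scoville (fun x => x) false) K 0 (scoville.length + 1)

-- ===== PRECONDITION & SPEC =====
-- A raises IndexError (heap_list[1] on the one-element list [None]) iff scoville = [].
def Pre_solution (scoville : List Int) (K : Int) : Prop := scoville ≠ []
instance (scoville : List Int) (K : Int) : Decidable (Pre_solution scoville K) := by
  unfold Pre_solution; infer_instance
def pvWitness_solution : List Int × Int := ([1, 2, 3, 9, 10, 12], 7)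

def Spec_solution (scoville : List Int) (K : Int) (out : Int) : Prop := out = solution_alt scoville K
instance (scoville : List Int) (K : Int) (out : Int) : Decidable (Spec_solution scoville K out) := by
  unfold Spec_solution; infer_instance

-- ===== CLAIM (what is proved, stated in full; the proofs are below) =====
def Claim_equal_solution : Prop := ∀ (scoville : List Int) (K : Int), Dom_solution scoville K → Pre_solution scoville K → Spec_solution scoville K (solution scoville K)

-- ===== LEMMAS AND PROOFS =====

theorem pvSwap_length (l : List Int) (i j : Nat) : (pvSwap l i j).length = l.length := by
  simp [pvSwap]

theorem pvGet_lt (l : List Int) (i : Nat) (h : i < l.length) : pvGet l i = l[i] := by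
  simp [pvGet, List.getD_eq_getElem?_getD, List.getElem?_eq_getElem h]

theorem pvGet_pvSwap (l : List Int) (i j m : Nat) (hi : i < l.length) (hj : j < l.length) :
    pvGet (pvSwap l i j) m =
      if m = j then pvGet l i else if m = i then pvGet l j else pvGet l m := by
  have key : ((l.set i (pvGet l j)).set j (pvGet l i))[m]? =
      if m = j then some (pvGet l i) else if m = i then some (pvGet l j) else l[m]? := by
    by_cases hm : m < l.length
    · rw [List.getElem?_set_of_lt _ _ (by simpa using hm), List.getElem?_set_of_lt _ _ hm]
      by_cases e1 : m = j
      · subst e1; simp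
      · rw [if_neg (fun h => e1 h.symm), if_neg e1]
        by_cases e2 : m = i
        · subst e2; simp
        · rw [if_neg (fun h => e2 h.symm), if_neg e2]
    · rw [if_neg (by omega), if_neg (by omega),
        List.getElem?_eq_none (by simpa using (by omega : l.length ≤ m)),
        List.getElem?_eq_none (by omega : l.length ≤ m)]
  simp only [pvGet, List.getD_eq_getElem?_getD] at key ⊢
  simp only [pvSwap, pvGet, List.getD_eq_getElem?_getD]
  rw [key]
  split_ifs <;> rfl

theorem count_set (l : List Int) (n : Nat) (a x : Int) (h : n < l.length) :
    (l.set n a).count x + (if l[n] = x then 1 else 0) = l.count x + (if a = x then 1 else 0) := by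
  induction l generalizing n with
  | nil => simp at h
  | cons hd tl ih =>
    cases n with
    | zero =>
      simp only [List.set_cons_zero, List.count_cons, List.getElem_cons_zero, beq_iff_eq]
      split_ifs <;> omega
    | succ n =>
      simp only [List.set_cons_succ, List.count_cons, List.getElem_cons_succ, beq_iff_eq]
      have := ih n (by simpa using h)
      split_ifs at this ⊢ <;> omega

theorem pvSwap_eq_self (l : List Int) (i : Nat) (hi : i < l.length) : pvSwap l i i = l := by
  rw [pvSwap, List.set_set, pvGet_lt _ _ hi, List.set_getElem_self]

theorem pvSwap_perm (l : List Int) (i j : Nat) (hi : i < l.length) (hj : j < l.length) :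
    (pvSwap l i j).Perm l := by
  by_cases hij : i = j
  · subst hij; rw [pvSwap_eq_self l i hi]
  · rw [List.perm_iff_count]
    intro x
    have hj' : j < (l.set i (pvGet l j)).length := by simpa using hj
    have c2 := count_set (l.set i (pvGet l j)) j (pvGet l i) x hj'
    have c1 := count_set l i (pvGet l j) x hi
    have hji : (l.set i (pvGet l j))[j] = l[j] := by
      rw [List.getElem_set_ne (by omega)]
    rw [hji] at c2
    rw [pvGet_lt _ _ hj] at c1
    rw [pvGet_lt _ _ hi, pvGet_lt _ _ hj] at c2
    unfold pvSwap
    rw [pvGet_lt _ _ hi, pvGet_lt _ _ hj]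
    split_ifs at c1 c2 <;> omega

theorem pvSwap_head (l : List Int) (i j : Nat) (hi : 1 ≤ i) (hj : 1 ≤ j) :
    pvGet (pvSwap l i j) 0 = pvGet l 0 := by
  have h1 : ¬ j = 0 := by omega
  have h2 : ¬ i = 0 := by omega
  simp [pvSwap, pvGet, List.getD_eq_getElem?_getD, List.getElem?_set, h1, h2]

theorem pvGet_append (l : List Int) (v : Int) (m : Nat) (h : m < l.length) :
    pvGet (l ++ [v]) m = pvGet l m := by
  simp [pvGet, List.getD_eq_getElem?_getD, List.getElem?_append_left h]

theorem pvGet_dropLast (l : List Int) (m : Nat) (h : m < l.length - 1) :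
    pvGet l.dropLast m = pvGet l m := by
  have h1 : m < l.dropLast.length := by simp; omega
  have h2 : m < l.length := by omega
  rw [pvGet_lt _ _ h1, pvGet_lt _ _ h2, List.getElem_dropLast]

-- from a permutation with the same head value, a permutation of the tails
theorem tail_perm_of_perm (l l' : List Int) (h : l.Perm l') (hne : l ≠ [])
    (h0 : pvGet l 0 = pvGet l' 0) : l.tail.Perm l'.tail := by
  obtain ⟨a, t, rfl⟩ := List.exists_cons_of_ne_nil hne
  have hne' : l' ≠ [] := by
    intro e; rw [e] at h; have := h.length_eq; simp at this
  obtain ⟨b, t', rfl⟩ := List.exists_cons_of_ne_nil hne'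
  have hab : a = b := by simpa [pvGet] using h0
  subst hab
  simpa using h.cons_inv

def HeapProp (l : List Int) : Prop :=
  ∀ i, 2 ≤ i → i < l.length → pvGet l (i / 2) ≤ pvGet l i

-- heap property everywhere except possibly on the edge into k, plus the grandparent bound
def HeapExceptUp (l : List Int) (k : Nat) : Prop :=
  (∀ i, 2 ≤ i → i < l.length → i ≠ k → pvGet l (i / 2) ≤ pvGet l i) ∧
  (2 ≤ k → ∀ c, 2 ≤ c → c < l.length → c / 2 = k → pvGet l (k / 2) ≤ pvGet l c)

theorem siftUp_spec (l : List Int) (k : Nat) : 1 ≤ k → k < l.length → HeapExceptUp l k →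
    HeapProp (siftUp l k) ∧ (siftUp l k).length = l.length ∧ (siftUp l k).Perm l ∧
      pvGet (siftUp l k) 0 = pvGet l 0 := by
  induction l, k using siftUp.induct with
  | case1 l k hcond ih =>
    intro hk1 hk hH
    obtain ⟨hk2, hlt⟩ := hcond
    rw [siftUp, dif_pos ⟨hk2, hlt⟩]
    have hhalf : k / 2 < l.length := by omega
    have hget : ∀ m, pvGet (pvSwap l k (k / 2)) m =
        if m = k / 2 then pvGet l k else if m = k then pvGet l (k / 2) else pvGet l m :=
      fun m => pvGet_pvSwap l k (k / 2) m hk hhalf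
    have hH' : HeapExceptUp (pvSwap l k (k / 2)) (k / 2) := by
      constructor
      · intro i hi2 hilen hine
        rw [pvSwap_length] at hilen
        rw [hget, hget]
        by_cases hik : i = k
        · subst hik
          split_ifs <;> omega
        · have hAi := hH.1 i hi2 hilen hik
          have hBi : i / 2 = k → pvGet l (k / 2) ≤ pvGet l i :=
            fun e => hH.2 (by omega) i hi2 hilen e
          by_cases e1 : i / 2 = k / 2
          · rw [if_pos e1, if_neg hine, if_neg hik]
            rw [e1] at hAi
            omega
          · rw [if_neg e1, if_neg hine, if_neg hik]
            by_cases e2 : i / 2 = k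
            · rw [if_pos e2]; exact hBi e2
            · rw [if_neg e2]; exact hAi
      · intro h2k' c hc2 hclen hck
        rw [pvSwap_length] at hclen
        rw [hget, hget]
        rw [if_neg (by omega : ¬ k / 2 / 2 = k / 2), if_neg (by omega : ¬ k / 2 / 2 = k)]
        by_cases hckk : c = k
        · rw [if_neg (by omega : ¬ c = k / 2), if_pos hckk]
          have := hH.1 (k / 2) (by omega) (by omega) (by omega)
          have e : k / 2 / 2 = k / 2 / 2 := rfl
          omega
        · rw [if_neg (by omega : ¬ c = k / 2), if_neg hckk]
          have h1 := hH.1 c hc2 hclen (by omega)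
          have h2 := hH.1 (k / 2) (by omega) (by omega) (by omega)
          rw [hck] at h1
          omega
    have hres := ih (by omega) (by rw [pvSwap_length]; omega) hH'
    refine ⟨hres.1, ?_, ?_, ?_⟩
    · rw [hres.2.1, pvSwap_length]
    · exact hres.2.2.1.trans (pvSwap_perm l k (k / 2) hk hhalf)
    · rw [hres.2.2.2, pvSwap_head l k (k / 2) (by omega) (by omega)]
  | case2 l k hcond =>
    intro hk1 hk hH
    rw [siftUp, dif_neg hcond]
    refine ⟨?_, rfl, List.Perm.refl _, rfl⟩
    intro i hi2 hilen
    by_cases hik : i = k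
    · subst hik
      have : ¬ pvGet l i < pvGet l (i / 2) := fun hl => hcond ⟨by omega, hl⟩
      omega
    · exact hH.1 i hi2 hilen hik

-- heap property everywhere except possibly on the edges out of p, plus the grandparent bound
def HeapExceptDown (l : List Int) (p : Nat) : Prop :=
  (∀ i, 2 ≤ i → i < l.length → i / 2 ≠ p → pvGet l (i / 2) ≤ pvGet l i) ∧
  (2 ≤ p → ∀ c, c < l.length → c / 2 = p → pvGet l (p / 2) ≤ pvGet l c)

theorem pickChild_spec (l : List Int) (p idx : Nat) (hp : 1 ≤ p) :
    (pickChild l p idx = p ∧ (p * 2 ≤ idx → pvGet l p ≤ pvGet l (p * 2)) ∧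
        (p * 2 + 1 ≤ idx → pvGet l p ≤ pvGet l (p * 2 + 1))) ∨
      ((pickChild l p idx = p * 2 ∨ pickChild l p idx = p * 2 + 1) ∧ pickChild l p idx ≤ idx ∧
        pvGet l (pickChild l p idx) < pvGet l p ∧
        (p * 2 ≤ idx → pvGet l (pickChild l p idx) ≤ pvGet l (p * 2)) ∧
        (p * 2 + 1 ≤ idx → pvGet l (pickChild l p idx) ≤ pvGet l (p * 2 + 1))) := by
  unfold pickChild; split_ifs <;> [right; right; right; left] <;>
    refine ⟨?_, ?_, ?_⟩ <;> first | omega | (intro _; omega)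

theorem siftDown_stop (l : List Int) (p idx : Nat) (hp : 1 ≤ p) (hidx : idx + 1 = l.length)
    (hH : HeapExceptDown l p) (hg : pickChild l p idx = p) : HeapProp l := by
  rcases pickChild_spec l p idx hp with ⟨_, hsl, hsr⟩ | ⟨hgor, _, _, _, _⟩
  · intro i hi2 hilen
    by_cases hip : i / 2 = p
    · have hi' : i = p * 2 ∨ i = p * 2 + 1 := by omega
      rcases hi' with rfl | rfl
      · rw [hip]; exact hsl (by omega)
      · rw [hip]; exact hsr (by omega)
    · exact hH.1 i hi2 hilen hip
  · exfalso; omega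

theorem siftDown_spec' (n : Nat) : ∀ (l : List Int) (p idx : Nat), idx + 1 - p ≤ n →
    1 ≤ p → idx + 1 = l.length → HeapExceptDown l p →
    HeapProp (siftDown l p idx) ∧ (siftDown l p idx).length = l.length ∧
      (siftDown l p idx).Perm l ∧ pvGet (siftDown l p idx) 0 = pvGet l 0 := by
  induction n with
  | zero =>
    intro l p idx hb hp hidx hH
    have hg : pickChild l p idx = p := by
      rcases pickChild_spec l p idx hp with ⟨e, _, _⟩ | ⟨hgor, hgidx, _, _, _⟩
      · exact e
      · omega
    rw [siftDown, dif_pos hg]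
    exact ⟨siftDown_stop l p idx hp hidx hH hg, rfl, List.Perm.refl _, rfl⟩
  | succ n ih =>
    intro l p idx hb hp hidx hH
    by_cases hg : pickChild l p idx = p
    · rw [siftDown, dif_pos hg]
      exact ⟨siftDown_stop l p idx hp hidx hH hg, rfl, List.Perm.refl _, rfl⟩
    · rw [siftDown, dif_neg hg]
      rcases pickChild_spec l p idx hp with ⟨e, _, _⟩ | ⟨hgor, hgidx, hglt, hbl, hbr⟩
      · exact absurd e hg
      · set g := pickChild l p idx with hgdef
        have hg1 : 1 ≤ g := by omega
        have hgln : g < l.length := by omega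
        have hpln : p < l.length := by omega
        have hget : ∀ m, pvGet (pvSwap l g p) m =
            if m = p then pvGet l g else if m = g then pvGet l p else pvGet l m :=
          fun m => pvGet_pvSwap l g p m hgln hpln
        have hH' : HeapExceptDown (pvSwap l g p) g := by
          constructor
          · intro i hi2 hilen hine
            rw [pvSwap_length] at hilen
            rw [hget, hget]
            by_cases hig : i = g
            · subst hig
              rw [if_pos (by omega : g / 2 = p), if_neg hg, if_pos rfl]
              omega
            · by_cases hipq : i = p
              · subst hipq
                rw [if_neg (by omega : ¬ i / 2 = i), if_neg (by omega : ¬ i / 2 = g),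
                  if_pos rfl]
                exact hH.2 hi2 g hgln (by omega)
              · rw [if_neg hipq, if_neg hig]
                by_cases hip2 : i / 2 = p
                · rw [if_pos hip2]
                  have hi' : i = p * 2 ∨ i = p * 2 + 1 := by omega
                  rcases hi' with rfl | rfl
                  · exact hbl (by omega)
                  · exact hbr (by omega)
                · rw [if_neg hip2]
                  by_cases hig2 : i / 2 = g
                  · exact absurd hig2 hine
                  · rw [if_neg hig2]; exact hH.1 i hi2 hilen hip2
          · intro hg2 c hclen hcg
            rw [pvSwap_length] at hclen
            rw [hget, hget]
            rw [if_pos (by omega : g / 2 = p)]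
            rw [if_neg (by omega : ¬ c = p), if_neg (by omega : ¬ c = g)]
            have h1 := hH.1 c (by omega) hclen (by omega)
            rw [hcg] at h1
            exact h1
        have hres := ih (pvSwap l g p) g idx (by omega) hg1
          (by rw [pvSwap_length]; omega) hH'
        refine ⟨hres.1, ?_, ?_, ?_⟩
        · rw [hres.2.1, pvSwap_length]
        · exact hres.2.2.1.trans (pvSwap_perm l g p hgln hpln)
        · rw [hres.2.2.2, pvSwap_head l g p hg1 (by omega)]

theorem heapInsert_spec (l : List Int) (v : Int) (hne : l ≠ []) (hH : HeapProp l) :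
    HeapProp (heapInsert l v) ∧ (heapInsert l v).length = l.length + 1 ∧
      (heapInsert l v).tail.Perm (l.tail ++ [v]) ∧ pvGet (heapInsert l v) 0 = pvGet l 0 := by
  have hk : 1 ≤ l.length := List.length_pos_of_ne_nil hne
  have h1 : HeapExceptUp (l ++ [v]) l.length := by
    constructor
    · intro i hi2 hilen hine
      have hl1 : i < l.length := by simp at hilen; omega
      rw [pvGet_append _ _ _ hl1, pvGet_append _ _ _ (by omega)]
      exact hH i hi2 hl1
    · intro _ c hc2 hclen hck
      exfalso
      simp at hclen
      omega
  have hs := siftUp_spec (l ++ [v]) l.length (by omega) (by simp) h1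
  unfold heapInsert
  refine ⟨hs.1, ?_, ?_, ?_⟩
  · rw [hs.2.1]; simp
  · have hne' : siftUp (l ++ [v]) l.length ≠ [] := by
      intro e
      have h7 := hs.2.1
      rw [e] at h7
      simp at h7
    have htp := tail_perm_of_perm _ _ hs.2.2.1 hne' hs.2.2.2
    refine htp.trans ?_
    obtain ⟨a, t, rfl⟩ := List.exists_cons_of_ne_nil hne
    simp
  · rw [hs.2.2.2, pvGet_append _ _ _ (by omega)]

theorem heapDelete_spec (l : List Int) (hH : HeapProp l) (hlen : 2 ≤ l.length) :
    (heapDelete l).1 = pvGet l 1 ∧ HeapProp (heapDelete l).2 ∧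
      (heapDelete l).2.length = l.length - 1 ∧
      ((heapDelete l).1 :: (heapDelete l).2.tail).Perm l.tail ∧
      pvGet (heapDelete l).2 0 = pvGet l 0 := by
  have h1n : 1 < l.length := by omega
  have hswlen : (pvSwap l 1 (l.length - 1)).length = l.length := pvSwap_length _ _ _
  have hm : pvGet (pvSwap l 1 (l.length - 1)) ((pvSwap l 1 (l.length - 1)).length - 1) =
      pvGet l 1 := by
    rw [hswlen, pvGet_pvSwap l 1 (l.length - 1) (l.length - 1) (by omega) (by omega),
      if_pos rfl]
  have hl1perm : (pvSwap l 1 (l.length - 1)).Perm l :=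
    pvSwap_perm l 1 (l.length - 1) (by omega) (by omega)
  have hl1h : pvGet (pvSwap l 1 (l.length - 1)) 0 = pvGet l 0 :=
    pvSwap_head l 1 (l.length - 1) (by omega) (by omega)
  set l1 := pvSwap l 1 (l.length - 1) with hl1def
  have hl1len : l1.length = l.length := hswlen
  have hl2len : l1.dropLast.length = l.length - 1 := by simp [hl1len]
  have hget2 : ∀ m, m < l.length - 1 → pvGet l1.dropLast m = pvGet l1 m := by
    intro m hm'
    exact pvGet_dropLast l1 m (by omega)
  have hget1 : ∀ m, 2 ≤ m → m < l.length - 1 → pvGet l1 m = pvGet l m := by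
    intro m hm1 hm2
    rw [hl1def, pvGet_pvSwap l 1 (l.length - 1) m (by omega) (by omega)]
    rw [if_neg (by omega), if_neg (by omega)]
  have hHED : HeapExceptDown l1.dropLast 1 := by
    constructor
    · intro i hi2 hilen hine
      rw [hl2len] at hilen
      rw [hget2 i (by omega), hget2 (i / 2) (by omega),
        hget1 i (by omega) (by omega), hget1 (i / 2) (by omega) (by omega)]
      exact hH i hi2 (by omega)
    · intro h21; exfalso; omega
  have hsd := siftDown_spec' (l1.dropLast.length - 1) l1.dropLast 1
    (l1.dropLast.length - 1) (by omega) (by omega) (by rw [hl2len]; omega) hHED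
  have hd1 : (heapDelete l).1 = pvGet l 1 := by
    rw [heapDelete]
    exact hm
  have hd2 : (heapDelete l).2 = siftDown l1.dropLast 1 (l1.dropLast.length - 1) := by
    rw [heapDelete]
  refine ⟨hd1, ?_, ?_, ?_, ?_⟩
  · rw [hd2]; exact hsd.1
  · rw [hd2, hsd.2.1, hl2len]
  · -- (pvGet l 1 :: tail of result) ~ l.tail
    rw [hd1, hd2]
    have hresne : siftDown l1.dropLast 1 (l1.dropLast.length - 1) ≠ [] := by
      intro e
      have := hsd.2.1
      rw [e] at this
      simp at this
      omega
    have htp := tail_perm_of_perm _ _ hsd.2.2.1 hresne hsd.2.2.2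
    -- l1 = a :: t with t ≠ []
    have hl1ne : l1 ≠ [] := by
      intro e; rw [e] at hl1len; simp at hl1len; omega
    obtain ⟨a, t, hl1eq⟩ := List.exists_cons_of_ne_nil hl1ne
    have htne : t ≠ [] := by
      intro e; rw [hl1eq, e] at hl1len; simp at hl1len; omega
    have hdrop : l1.dropLast = a :: t.dropLast := by
      rw [hl1eq, List.dropLast_cons_of_ne_nil htne]
    have htl : 1 ≤ t.length := List.length_pos_of_ne_nil htne
    have hlastt : t.getLast htne = pvGet l 1 := by
      have e1 : t.getLast htne = pvGet t (t.length - 1) := by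
        rw [pvGet_lt _ _ (by omega : t.length - 1 < t.length)]
        exact List.getLast_eq_getElem htne
      have e2 : pvGet (a :: t) (t.length - 1 + 1) = pvGet t (t.length - 1) := by
        simp [pvGet]
      have e3 : pvGet l1 (l1.length - 1) = pvGet (a :: t) (t.length - 1 + 1) := by
        rw [hl1eq]
        congr 1
        simp
        omega
      rw [e1, ← e2, ← e3]
      exact hm
    have htail_l1 : l1.tail = t := by rw [hl1eq]; rfl
    have hperm1 : l1.tail.Perm l.tail := by
      apply tail_perm_of_perm _ _ hl1perm _ hl1h
      exact hl1ne
    have hsplit : t.dropLast ++ [pvGet l 1] = t := by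
      rw [← hlastt]
      exact List.dropLast_append_getLast htne
    have e4 : l1.dropLast.tail = t.dropLast := by rw [hdrop, List.tail_cons]
    rw [e4] at htp
    have s1 : (pvGet l 1 :: t.dropLast).Perm t := by
      conv_rhs => rw [← hsplit]
      exact (List.perm_append_singleton _ _).symm
    have s2 : (t : List Int).Perm l.tail := by
      rw [htail_l1] at hperm1
      exact hperm1
    exact (htp.cons _).trans (s1.trans s2)
  · rw [hd2, hsd.2.2.2, hget2 0 (by omega), hl1h]

theorem heap_min (l : List Int) (hH : HeapProp l) : ∀ x ∈ l.tail, pvGet l 1 ≤ x := by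
  have key : ∀ i, 1 ≤ i → i < l.length → pvGet l 1 ≤ pvGet l i := by
    intro i
    induction i using Nat.strong_induction_on with
    | _ i ih =>
      intro h1 hlen
      rcases Nat.lt_or_ge i 2 with h2 | h2
      · have : i = 1 := by omega
        subst this; exact le_refl _
      · exact le_trans (ih (i / 2) (by omega) (by omega) (by omega)) (hH i h2 hlen)
  cases l with
  | nil => intro x hx; simp at hx
  | cons c ts =>
    intro x hx
    simp only [List.tail_cons] at hx
    obtain ⟨k, hk, rfl⟩ := List.mem_iff_getElem.mp hx
    have hg : pvGet (c :: ts) (k + 1) = ts[k] := by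
      rw [pvGet_lt _ _ (by simp; omega)]
      simp
    rw [← hg]
    exact key (k + 1) (by omega) (by simp; omega)

-- with a heap whose payload is a permutation of a sorted a :: t, the root is a
theorem heap_head (l : List Int) (a : Int) (t : List Int) (hH : HeapProp l)
    (hp : l.tail.Perm (a :: t)) (hs : (a :: t).Pairwise (· ≤ ·)) : pvGet l 1 = a := by
  cases l with
  | nil =>
    exfalso
    have := hp.length_eq
    simp at this
  | cons c ts =>
    simp only [List.tail_cons] at hp
    have hne : ts ≠ [] := by
      intro e
      rw [e] at hp
      have := hp.length_eq
      simp at this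
    obtain ⟨d, ts', rfl⟩ := List.exists_cons_of_ne_nil hne
    have hget : pvGet (c :: d :: ts') 1 = d := by simp [pvGet]
    have h1 : pvGet (c :: d :: ts') 1 ∈ (c :: d :: ts').tail := by rw [hget]; simp
    have ha' : pvGet (c :: d :: ts') 1 ∈ a :: t := hp.mem_iff.mp (by simpa using h1)
    have h2 : a ∈ (c :: d :: ts').tail := by
      simp only [List.tail_cons]
      exact hp.mem_iff.mpr (by simp)
    have hmin := heap_min (c :: d :: ts') hH a h2
    have hle : a ≤ pvGet (c :: d :: ts') 1 := by
      rcases List.mem_cons.mp ha' with e | hm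
      · omega
      · exact (List.pairwise_cons.mp hs).1 _ hm
    omega

theorem insSorted_perm (x : Int) (l : List Int) : (insSorted x l).Perm (x :: l) := by
  induction l with
  | nil => simp [insSorted]
  | cons h t ih =>
    simp only [insSorted]
    split_ifs with hle
    · exact (ih.cons h).trans (List.Perm.swap x h t)
    · rfl

theorem insSorted_pairwise (x : Int) (l : List Int) (h : l.Pairwise (· ≤ ·)) :
    (insSorted x l).Pairwise (· ≤ ·) := by
  induction l with
  | nil => simp [insSorted]
  | cons hd t ih =>
    rcases List.pairwise_cons.mp h with ⟨hhd, ht⟩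
    simp only [insSorted]
    split_ifs with hle
    · refine List.pairwise_cons.mpr ⟨?_, ih ht⟩
      intro y hy
      rcases List.mem_cons.mp ((insSorted_perm x t).mem_iff.mp hy) with rfl | hy'
      · exact hle
      · exact hhd y hy'
    · refine List.pairwise_cons.mpr ⟨?_, h⟩
      intro y hy
      rcases List.mem_cons.mp hy with rfl | hy'
      · omega
      · exact le_trans (by omega) (hhd y hy')

-- the simulation relation between A's heap state and B's sorted-list state
def SimRel (l : List Int) (s : List Int) : Prop :=
  l.length = s.length + 1 ∧ HeapProp l ∧ l.tail.Perm s ∧ s.Pairwise (· ≤ ·) ∧ s ≠ []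

theorem loop_sim (fuel : Nat) : ∀ (l s : List Int) (K r : Int), SimRel l s →
    solLoop l K r fuel = altLoop s K r fuel := by
  induction fuel with
  | zero => intro l s K r _; rfl
  | succ fuel ih =>
    intro l s K r hrel
    obtain ⟨hlen, hH, hperm, hsort, hne⟩ := hrel
    obtain ⟨a, t, rfl⟩ := List.exists_cons_of_ne_nil hne
    have ha : pvGet l 1 = a := heap_head l a t hH hperm hsort
    simp only [solLoop, altLoop, ha]
    by_cases haK : a < K
    · rw [if_pos haK, if_pos haK]
      cases t with
      | nil =>
        have h2 : l.length = 2 := by simp at hlen; omega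
        rw [if_pos h2]
      | cons b rest =>
        have hlonger : ¬ l.length = 2 := by simp at hlen; omega
        rw [if_neg hlonger]
        have hd1 := heapDelete_spec l hH (by simp at hlen; omega)
        have hd1v : (heapDelete l).1 = a := by rw [hd1.1, ha]
        have ht1 : (heapDelete l).2.tail.Perm (b :: rest) := by
          have hx := hd1.2.2.2.1
          rw [hd1v] at hx
          have : (a :: (heapDelete l).2.tail).Perm (a :: b :: rest) := hx.trans hperm
          exact this.cons_inv
        have hsort' : (b :: rest).Pairwise (· ≤ ·) := (List.pairwise_cons.mp hsort).2
        have hb : pvGet (heapDelete l).2 1 = b := heap_head _ b rest hd1.2.1 ht1 hsort'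
        have hlen1 : (heapDelete l).2.length = rest.length + 2 := by
          rw [hd1.2.2.1]; simp at hlen; omega
        have hd2 := heapDelete_spec (heapDelete l).2 hd1.2.1 (by omega)
        have hd2v : (heapDelete (heapDelete l).2).1 = b := by rw [hd2.1, hb]
        have ht2 : (heapDelete (heapDelete l).2).2.tail.Perm rest := by
          have hx := hd2.2.2.2.1
          rw [hd2v] at hx
          exact (hx.trans ht1).cons_inv
        have hlen2 : (heapDelete (heapDelete l).2).2.length = rest.length + 1 := by
          rw [hd2.2.2.1]; omega
        have hne2 : (heapDelete (heapDelete l).2).2 ≠ [] := by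
          intro e; rw [e] at hlen2; simp at hlen2
        have hins := heapInsert_spec (heapDelete (heapDelete l).2).2
          ((heapDelete l).1 + (heapDelete (heapDelete l).2).1 * 2) hne2 hd2.2.1
        rw [hd1v, hd2v] at hins
        rw [hd1v, hd2v]
        apply ih
        have hslen : (insSorted (a + b * 2) rest).length = rest.length + 1 := by
          simpa using (insSorted_perm (a + b * 2) rest).length_eq
        refine ⟨?_, hins.1, ?_, ?_, ?_⟩
        · rw [hins.2.1, hlen2, hslen]
        · refine hins.2.2.1.trans ?_
          refine (ht2.append_right [a + b * 2]).trans ?_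
          exact (List.perm_append_singleton _ _).trans (insSorted_perm _ _).symm
        · exact insSorted_pairwise _ _ (List.pairwise_cons.mp hsort').2
        · intro e; rw [e] at hslen; simp at hslen
    · rw [if_neg haK, if_neg haK]

theorem build_spec (xs : List Int) : ∀ h : List Int, h ≠ [] → HeapProp h →
    HeapProp (xs.foldl (fun a i => heapInsert a i) h) ∧
      (xs.foldl (fun a i => heapInsert a i) h).length = h.length + xs.length ∧
      ((xs.foldl (fun a i => heapInsert a i) h).tail).Perm (h.tail ++ xs) := by
  induction xs with
  | nil => intro h hne hH; exact ⟨hH, by simp, by simp⟩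
  | cons x xs ih =>
    intro h hne hH
    simp only [List.foldl_cons]
    have hx := heapInsert_spec h x hne hH
    have hne' : heapInsert h x ≠ [] := by
      intro e
      have h7 := hx.2.1
      rw [e] at h7
      simp at h7
    have hr := ih (heapInsert h x) hne' hx.1
    refine ⟨hr.1, ?_, ?_⟩
    · rw [hr.2.1, hx.2.1]; simp only [List.length_cons]; omega
    · refine hr.2.2.trans ?_
      have := hx.2.2.1.append_right xs
      simpa [List.append_assoc] using this

-- ===== VERDICT (by name: the statement is the Claim_ definition above) =====
theorem solution_spec : Claim_equal_solution := by
  intro scoville K _ hpre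
  unfold Spec_solution solution solution_alt
  have hs₁ : (PySem.List.sorted scoville (fun x => x) false).Perm scoville :=
    PySem.List.sorted_perm scoville (fun x => x) false
  have hsp : (PySem.List.sorted scoville (fun x => x) false).Pairwise (· ≤ ·) := by
    simpa using PySem.List.sorted_pairwise (xs := scoville) (key := fun x => x)
  have hb := build_spec scoville [0] (by simp) (by intro i h2 hl; simp at hl; omega)
  apply loop_sim
  refine ⟨?_, hb.1, ?_, hsp, ?_⟩
  · rw [hb.2.1, hs₁.length_eq]
    show 1 + scoville.length = scoville.length + 1
    omega
  · refine hb.2.2.trans ?_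
    simpa using hs₁.symm
  · intro e
    rw [e] at hs₁
    have := hs₁.length_eq
    simp at this
    exact hpre (List.eq_nil_of_length_eq_zero this.symm)
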